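-- pv_equiv track=rewrite | github.com/MrBrantCode/unitest_baseline | mut_generate/mist_train_taco/taco_8235/solution.py | can_construct_bst
-- ===== SOURCE A (Python) =====
-- from math import gcd
--
-- def can_construct_bst(n: int, a: list) -> bool:
--     """
--     Determines if it is possible to construct a binary search tree from the given vertices
--     such that the greatest common divisor of any two vertices connected by an edge is greater than 1.
--
--     Parameters:
--     n (int): The number of vertices.
--     a (list): A list of distinct integers representing the values of the vertices in ascending order.
--
--     Returns:
--     bool: True if it is possible to construct the binary search tree, False otherwise.
--     """
--     GCD = [1 << i for i in range(n + 1)]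
--     for i in range(n):
--         for j in range(i):
--             if gcd(a[i], a[j]) > 1:
--                 GCD[i] += 1 << j
--                 GCD[j] += 1 << i
--
--     check1 = [1 << j for j in range(n + 1)]
--     check2 = [1 << j for j in range(n + 1)]
--
--     for i in range(n):
--         check1[0] |= int(bool(check1[0] & check2[i] & GCD[i + 1])) * (1 << i + 1)
--         for j in range(1, n - i):
--             check1[j] |= int(bool(check1[j] & check2[i + j] & GCD[j + i + 1])) * (1 << i + j + 1)
--             check2[j + i] |= int(bool(check1[j] & check2[i + j] & GCD[j - 1])) * (1 << j - 1)
--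
--     ans = bool(check1[0] & check2[n - 1])
--     return ans
-- ===== SOURCE B (Python) =====
-- from math import gcd
--
-- def can_construct_bst(n: int, a: list) -> bool:
--     # Interval DP over plain boolean tables instead of A's bitmask arithmetic.
--     # canL[(l, r)]: a[l..r] forms a valid subtree hung below parent a[r+1];
--     # canR[(l, r)]: a[l..r] forms a valid subtree hung below parent a[l-1].
--     if n == 0:
--         return True
--     canL = {}
--     canR = {}
--     for r in range(n):
--         for l in range(r, -1, -1):
--             okL = False
--             okR = False
--             for k in range(l, r + 1):
--                 if (k == l or canL[(l, k - 1)]) and (k == r or canR[(k + 1, r)]):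
--                     okL = okL or (r + 1 < n and gcd(a[k], a[r + 1]) > 1)
--                     okR = okR or (l > 0 and gcd(a[k], a[l - 1]) > 1)
--             canL[(l, r)] = okL
--             canR[(l, r)] = okR
--     return any((k == 0 or canL[(0, k - 1)]) and (k == n - 1 or canR[(k + 1, n - 1)])
--                for k in range(n))
-- ===== Notes on version B (the rewrite author's own statement) =====
-- stated objective: simpler
-- what changed: A encodes the interval DP in big-integer bitmask arrays updated with shifts/AND/OR in a length-indexed double loop; B computes the same DP with plain boolean tables (dicts keyed by interval (l,r)) filled by right endpoint with descending left endpoint and an explicit root scan, with no bit arithmetic.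
import Mathlib
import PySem

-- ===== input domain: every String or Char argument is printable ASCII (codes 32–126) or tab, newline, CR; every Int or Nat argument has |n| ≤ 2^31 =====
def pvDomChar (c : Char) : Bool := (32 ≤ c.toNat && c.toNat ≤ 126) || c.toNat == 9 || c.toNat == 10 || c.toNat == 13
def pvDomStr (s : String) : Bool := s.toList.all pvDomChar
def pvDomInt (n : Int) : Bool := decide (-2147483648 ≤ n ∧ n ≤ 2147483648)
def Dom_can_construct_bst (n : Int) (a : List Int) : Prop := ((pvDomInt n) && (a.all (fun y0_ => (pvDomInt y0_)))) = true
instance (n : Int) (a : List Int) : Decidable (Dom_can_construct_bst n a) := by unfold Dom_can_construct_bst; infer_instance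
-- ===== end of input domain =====

-- B replaces A's big-integer bitmask DP by the same-complexity interval DP over plain
-- boolean tables (dictionaries keyed by the interval), filled in a different order
-- (by right endpoint, left endpoint descending) — objective: simpler, no bit tricks.

-- ===== PORT A =====
-- math.gcd(x, y) > 1  (math.gcd is the gcd of the absolute values, = Int.gcd); shared primitive
def pvAdj (a : List Int) (k p : Nat) : Bool := decide (1 < Int.gcd (a.getD k 0) (a.getD p 0))

-- A's Python ints are nonnegative bitmasks: 1 << i is ported as 2^i on Nat, |= as |||,
-- & as &&&, bool(x) as x ≠ 0.  All list indices below are in range under Pre_, so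
-- xs[i] is ported as getD i 0 (exact there); the one possibly-negative index, check2[n-1],
-- is ported with PySem.List.pyGet? (exact Python wraparound).
def pvA_gcdTab (nt : Nat) (a : List Int) : List Nat :=
  (List.range nt).foldl (fun G i =>
    (List.range i).foldl (fun G j =>
      if pvAdj a i j then
        let G1 := G.set i (G.getD i 0 + 2^j)
        G1.set j (G1.getD j 0 + 2^i)
      else G) G)
    ((List.range (nt+1)).map (fun i => 2^i))

def pvA_innerBody (G : List Nat) (i : Nat) (st : List Nat × List Nat) (j : Nat) : List Nat × List Nat :=
  let c1 := st.1.set j (st.1.getD j 0 |||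
    (if st.1.getD j 0 &&& st.2.getD (i+j) 0 &&& G.getD (j+i+1) 0 ≠ 0 then 2^(i+j+1) else 0))
  let c2 := st.2.set (j+i) (st.2.getD (j+i) 0 |||
    (if c1.getD j 0 &&& st.2.getD (i+j) 0 &&& G.getD (j-1) 0 ≠ 0 then 2^(j-1) else 0))
  (c1, c2)

def pvA_outerBody (nt : Nat) (G : List Nat) (st : List Nat × List Nat) (i : Nat) : List Nat × List Nat :=
  let c1 := st.1.set 0 (st.1.getD 0 0 |||
    (if st.1.getD 0 0 &&& st.2.getD i 0 &&& G.getD (i+1) 0 ≠ 0 then 2^(i+1) else 0))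
  (List.range' 1 (nt - i - 1)).foldl (pvA_innerBody G i) (c1, st.2)   -- range(1, n-i)

def can_construct_bst (n : Int) (a : List Int) : Bool :=
  let nt := n.toNat   -- range(n): empty for n ≤ 0; Pre_ gives 0 ≤ n
  let G := pvA_gcdTab nt a
  let init : List Nat := (List.range (nt+1)).map (fun j => 2^j)
  let st := (List.range nt).foldl (pvA_outerBody nt G) (init, init)
  decide (st.1.getD 0 0 &&& (PySem.List.pyGet? st.2 (n-1)).getD 0 ≠ 0)

-- ===== PORT B =====
-- canL/canR are Python dicts keyed by (l, r); every key B reads was inserted on an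
-- earlier iteration, so d[key] is ported as getD key false (exact on those reads).
def pvB_innerBody (nt : Nat) (a : List Int) (r : Nat)
    (tb : PySem.Dict (Int × Int) Bool × PySem.Dict (Int × Int) Bool) (l : Nat) :
    PySem.Dict (Int × Int) Bool × PySem.Dict (Int × Int) Bool :=
  let ok := (List.range' l (r + 1 - l)).foldl (fun (ok : Bool × Bool) k =>
    if ((k == l) || tb.1.getD ((l : Int), (k : Int) - 1) false) &&
       ((k == r) || tb.2.getD ((k : Int) + 1, (r : Int)) false) then
      (ok.1 || (decide (r + 1 < nt) && pvAdj a k (r+1)),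
       ok.2 || (decide (0 < l) && pvAdj a k (l-1)))
    else ok) (false, false)
  (tb.1.insert ((l : Int), (r : Int)) ok.1, tb.2.insert ((l : Int), (r : Int)) ok.2)

def pvB_outerBody (nt : Nat) (a : List Int)
    (tb : PySem.Dict (Int × Int) Bool × PySem.Dict (Int × Int) Bool) (r : Nat) :
    PySem.Dict (Int × Int) Bool × PySem.Dict (Int × Int) Bool :=
  ((List.range (r + 1)).reverse).foldl (pvB_innerBody nt a r) tb   -- range(r, -1, -1)

def can_construct_bst_alt (n : Int) (a : List Int) : Bool :=
  if n == 0 then true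
  else
    let nt := n.toNat
    let tb := (List.range nt).foldl (pvB_outerBody nt a)
      ((PySem.Dict.empty : PySem.Dict (Int × Int) Bool), (PySem.Dict.empty : PySem.Dict (Int × Int) Bool))
    (List.range nt).any (fun k =>
      ((k == 0) || tb.1.getD (0, (k : Int) - 1) false) &&
      ((k == nt - 1) || tb.2.getD ((k : Int) + 1, (nt : Int) - 1) false))

-- ===== PRECONDITION & SPEC =====
-- A raises IndexError when n < 0 (index [0] of an empty list) and when n ≥ 2 with
-- fewer than n values (a[i] out of range); exactly those inputs are excluded.
def Pre_can_construct_bst (n : Int) (a : List Int) : Prop :=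
  0 ≤ n ∧ (n ≤ 1 ∨ n ≤ a.length)
instance (n : Int) (a : List Int) : Decidable (Pre_can_construct_bst n a) := by
  unfold Pre_can_construct_bst; infer_instance
def pvWitness_can_construct_bst : Int × List Int := (3, [2, 4, 6])
def Spec_can_construct_bst (n : Int) (a : List Int) (out : Bool) : Prop := out = can_construct_bst_alt n a
instance (n : Int) (a : List Int) (out : Bool) : Decidable (Spec_can_construct_bst n a out) := by unfold Spec_can_construct_bst; infer_instance

-- ===== CLAIM (what is proved, stated in full; the proofs are below) =====
def Claim_equal_can_construct_bst : Prop := ∀ (n : Int) (a : List Int), Dom_can_construct_bst n a → Pre_can_construct_bst n a → Spec_can_construct_bst n a (can_construct_bst n a)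

-- ===== LEMMAS AND PROOFS =====

-- the common specification: pvL nt a l r ⇔ a[l..r] is a valid subtree hung below a[r+1],
-- pvR nt a l r ⇔ a[l..r] is a valid subtree hung below a[l-1]
mutual
def pvL (nt : Nat) (a : List Int) (l r : Nat) : Bool :=
  (List.range' l (r + 1 - l)).attach.any (fun kk =>
    (if kk.1 = l then true else pvL nt a l (kk.1 - 1)) &&
    ((if kk.1 = r then true else pvR nt a (kk.1 + 1) r) &&
     (decide (r + 1 < nt) && pvAdj a kk.1 (r+1))))
  termination_by r + 1 - l
  decreasing_by
    · have := List.mem_range'_1.mp kk.2; omega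
    · have := List.mem_range'_1.mp kk.2; omega
def pvR (nt : Nat) (a : List Int) (l r : Nat) : Bool :=
  (List.range' l (r + 1 - l)).attach.any (fun kk =>
    (if kk.1 = l then true else pvL nt a l (kk.1 - 1)) &&
    ((if kk.1 = r then true else pvR nt a (kk.1 + 1) r) &&
     (decide (1 ≤ l) && pvAdj a kk.1 (l-1))))
  termination_by r + 1 - l
  decreasing_by
    · have := List.mem_range'_1.mp kk.2; omega
    · have := List.mem_range'_1.mp kk.2; omega
end

lemma pv_ite_true_iff (c : Prop) [Decidable c] (x : Bool) :
    ((if c then true else x) = true) ↔ (c ∨ x = true) := by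
  split_ifs with h <;> simp [h]

lemma pvL_iff (nt : Nat) (a : List Int) (l r : Nat) :
    pvL nt a l r = true ↔ ∃ k, l ≤ k ∧ k ≤ r ∧
      (k = l ∨ pvL nt a l (k-1) = true) ∧ (k = r ∨ pvR nt a (k+1) r = true) ∧
      r + 1 < nt ∧ pvAdj a k (r+1) = true := by
  rw [pvL]
  simp only [List.any_eq_true, List.mem_attach, true_and, Subtype.exists,
    Bool.and_eq_true, pv_ite_true_iff, decide_eq_true_eq, List.mem_range'_1]
  constructor
  · rintro ⟨k, ⟨hk1, hk2⟩, h1, h2, h3, h4⟩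
    exact ⟨k, hk1, by omega, h1, h2, h3, h4⟩
  · rintro ⟨k, hk1, hk2, h1, h2, h3, h4⟩
    exact ⟨k, ⟨hk1, by omega⟩, h1, h2, h3, h4⟩

lemma pvR_iff (nt : Nat) (a : List Int) (l r : Nat) :
    pvR nt a l r = true ↔ ∃ k, l ≤ k ∧ k ≤ r ∧
      (k = l ∨ pvL nt a l (k-1) = true) ∧ (k = r ∨ pvR nt a (k+1) r = true) ∧
      1 ≤ l ∧ pvAdj a k (l-1) = true := by
  rw [pvR]
  simp only [List.any_eq_true, List.mem_attach, true_and, Subtype.exists,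
    Bool.and_eq_true, pv_ite_true_iff, decide_eq_true_eq, List.mem_range'_1]
  constructor
  · rintro ⟨k, ⟨hk1, hk2⟩, h1, h2, h3, h4⟩
    exact ⟨k, hk1, by omega, h1, h2, h3, h4⟩
  · rintro ⟨k, hk1, hk2, h1, h2, h3, h4⟩
    exact ⟨k, ⟨hk1, by omega⟩, h1, h2, h3, h4⟩

def pvAnswer (nt : Nat) (a : List Int) : Bool :=
  if nt = 0 then true else
  (List.range nt).any (fun k =>
    ((k == 0) || pvL nt a 0 (k-1)) && ((k == nt - 1) || pvR nt a (k+1) (nt-1)))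

-- generic fold-invariant lemmas
lemma pv_foldl_range_inv {σ : Type} (f : σ → Nat → σ) (P : Nat → σ → Prop) (N : Nat) (s0 : σ)
    (h0 : P 0 s0) (hs : ∀ i s, i < N → P i s → P (i+1) (f s i)) :
    P N ((List.range N).foldl f s0) := by
  induction N with
  | zero => simpa using h0
  | succ N ih =>
    rw [List.range_succ, List.foldl_append]
    exact hs N _ (Nat.lt_succ_self N) (ih (fun i s hi hp => hs i s (Nat.lt_succ_of_lt hi) hp))

lemma pv_foldl_range'_inv {σ : Type} (f : σ → Nat → σ) (P : Nat → σ → Prop) (s m : Nat) (s0 : σ)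
    (h0 : P s s0) (hs : ∀ j st, s ≤ j → j < s + m → P j st → P (j+1) (f st j)) :
    P (s+m) ((List.range' s m).foldl f s0) := by
  induction m with
  | zero => simpa using h0
  | succ m ih =>
    rw [show List.range' s (m+1) = List.range' s m ++ [s + 1*m] from List.range'_concat,
      List.foldl_append]
    simp only [List.foldl_cons, List.foldl_nil, one_mul]
    have : P (s + m + 1) (f ((List.range' s m).foldl f s0) (s + m)) :=
      hs (s + m) _ (by omega) (by omega) (ih (fun j st h1 h2 hp => hs j st h1 (by omega) hp))
    have e : s + (m + 1) = s + m + 1 := by omega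
    rw [e]; exact this

lemma pv_foldl_revrange_inv {σ : Type} (f : σ → Nat → σ) (P : Nat → σ → Prop) (m : Nat) (s0 : σ)
    (h0 : P m s0) (hs : ∀ l st, l < m → P (l+1) st → P l (f st l)) :
    P 0 (((List.range m).reverse).foldl f s0) := by
  induction m generalizing s0 with
  | zero => simpa using h0
  | succ m ih =>
    rw [List.range_succ, List.reverse_append]
    simp only [List.reverse_cons, List.reverse_nil, List.nil_append]
    exact ih (f s0 m) (hs m s0 (Nat.lt_succ_self m) h0)
      (fun l st hl hp => hs l st (Nat.lt_succ_of_lt hl) hp)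

-- bit lemmas
lemma pv_testBit_add_two_pow (x j b : Nat) (h : x.testBit j = false) :
    (x + 2^j).testBit b = (x.testBit b || decide (b = j)) := by
  have hdm : x / 2^j % 2 = 0 := by
    rw [Nat.testBit_eq_decide_div_mod_eq] at h
    simp only [decide_eq_false_iff_not] at h
    have := Nat.mod_two_eq_zero_or_one (x / 2^j)
    omega
  have hx : x % 2^(j+1) < 2^j := by
    have hms : x % 2^(j+1) = x % 2^j + 2^j * (x / 2^j % 2) := Nat.mod_pow_succ
    rw [hdm, Nat.mul_zero, Nat.add_zero] at hms
    rw [hms]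
    exact Nat.mod_lt _ (Nat.two_pow_pos j)
  rcases lt_trichotomy b j with hb | hb | hb
  · -- low bits unchanged
    have hdvd : (2:Nat)^j = 2^(b+1) * 2^(j-(b+1)) := by
      rw [← pow_add]; congr 1; omega
    have key : ∀ y : Nat, y.testBit b = (y % 2^(b+1)).testBit b := by
      intro y; rw [Nat.testBit_mod_two_pow]; simp
    rw [key (x + 2^j), key x, hdvd, Nat.add_mul_mod_self_left]
    simp [Nat.ne_of_lt hb]
  · -- b = j
    subst hb
    rw [h, Nat.testBit_eq_decide_div_mod_eq,
      Nat.add_div_right x (Nat.two_pow_pos b), Nat.add_mod, hdm]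
    simp
  · -- high bits unchanged: no carry past j
    have hlt : x % 2^(j+1) + 2^j < 2^(j+1) := by
      have hp : (2:Nat)^(j+1) = 2^j * 2 := by rw [Nat.pow_succ]
      omega
    have hq : (x + 2^j) / 2^(j+1) = x / 2^(j+1) := by
      have e : x + 2^j = 2^(j+1) * (x / 2^(j+1)) + (x % 2^(j+1) + 2^j) := by
        have := Nat.div_add_mod x (2^(j+1)); omega
      rw [e, Nat.mul_add_div (Nat.two_pow_pos (j+1)), Nat.div_eq_of_lt hlt, Nat.add_zero]
    have key : ∀ y : Nat, y.testBit b = (y / 2^(j+1)).testBit (b - (j+1)) := by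
      intro y
      have he : j + 1 + (b - (j+1)) = b := by omega
      rw [Nat.testBit_eq_decide_div_mod_eq, Nat.testBit_eq_decide_div_mod_eq,
        Nat.div_div_eq_div_mul, ← pow_add, he]
    rw [key (x + 2^j), key x, hq]
    simp [Nat.ne_of_gt hb]

lemma pv_land3_ne_zero (x y z : Nat) :
    x &&& y &&& z ≠ 0 ↔ ∃ b, x.testBit b = true ∧ y.testBit b = true ∧ z.testBit b = true := by
  constructor
  · intro h
    by_contra hc
    push Not at hc
    apply h
    apply Nat.zero_of_testBit_eq_false
    intro i
    rw [Nat.testBit_land, Nat.testBit_land]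
    by_cases h1 : x.testBit i = true
    · by_cases h2 : y.testBit i = true
      · have h3 := hc i h1 h2
        simp [h1, h2, h3]
      · simp [Bool.eq_false_iff.mpr h2]
    · simp [Bool.eq_false_iff.mpr h1]
  · rintro ⟨b, h1, h2, h3⟩ h0
    have hb : (x &&& y &&& z).testBit b = true := by
      rw [Nat.testBit_land, Nat.testBit_land, h1, h2, h3]
      rfl
    rw [h0] at hb
    simp [Nat.zero_testBit] at hb

lemma pv_land2_ne_zero (x y : Nat) :
    x &&& y ≠ 0 ↔ ∃ b, x.testBit b = true ∧ y.testBit b = true := by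
  constructor
  · intro h
    by_contra hc
    push Not at hc
    apply h
    apply Nat.zero_of_testBit_eq_false
    intro i
    rw [Nat.testBit_land]
    by_cases h1 : x.testBit i = true
    · have h2 := hc i h1
      simp [h1, h2]
    · simp [Bool.eq_false_iff.mpr h1]
  · rintro ⟨b, h1, h2⟩ h0
    have hb : (x &&& y).testBit b = true := by rw [Nat.testBit_land, h1, h2]; rfl
    rw [h0] at hb
    simp [Nat.zero_testBit] at hb

lemma pv_lor_ite_testBit (x p b : Nat) (c : Prop) [Decidable c] :
    ((x ||| (if c then 2^p else 0)).testBit b = true) ↔ (x.testBit b = true ∨ (c ∧ b = p)) := by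
  split_ifs with hc
  · rw [Nat.testBit_lor]
    by_cases hb : b = p
    · subst hb
      simp [Nat.testBit_two_pow_self, hc]
    · rw [Nat.testBit_two_pow_of_ne (fun h => hb h.symm)]
      simp [hb]
  · simp [hc]

lemma pv_getD_set {α : Type} (l : List α) (i : Nat) (v d : α) (h : i < l.length) (p : Nat) :
    (l.set i v).getD p d = if p = i then v else l.getD p d := by
  obtain rfl | hne := eq_or_ne p i
  · rw [if_pos rfl, List.getD_eq_getElem?_getD, List.getElem?_set_self (by simpa using h)]
    rfl
  · rw [if_neg hne, List.getD_eq_getElem?_getD, List.getD_eq_getElem?_getD,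
      List.getElem?_set_ne (fun h' => hne h'.symm)]

lemma pv_getD_pow_init (nt j : Nat) (h : j ≤ nt) :
    ((List.range (nt+1)).map (fun i => (2:Nat)^i)).getD j 0 = 2^j := by
  rw [List.getD_eq_getElem?_getD, List.getElem?_map, List.getElem?_range (by omega)]
  rfl

-- GCD table characterisation
lemma pvAdj_comm (a : List Int) (k p : Nat) : pvAdj a k p = pvAdj a p k := by
  simp [pvAdj, Int.gcd_comm]

def pvGInv (nt : Nat) (a : List Int) (i J : Nat) (G : List Nat) : Prop :=
  G.length = nt+1 ∧
  ∀ p, p ≤ nt → ∀ b, ((G.getD p 0).testBit b = true ↔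
    (b = p ∨ (((b < p ∧ (p < i ∨ (p = i ∧ b < J))) ∨ (p < b ∧ (b < i ∨ (b = i ∧ p < J)))) ∧
      pvAdj a b p = true)))

lemma pvG_inner_step (nt : Nat) (a : List Int) (i j : Nat) (G : List Nat)
    (hi : i ≤ nt) (hj : j < i) (h : pvGInv nt a i j G) :
    pvGInv nt a i (j+1)
      (if pvAdj a i j then
        (G.set i (G.getD i 0 + 2^j)).set j ((G.set i (G.getD i 0 + 2^j)).getD j 0 + 2^i)
      else G) := by
  obtain ⟨hlen, hch⟩ := h
  by_cases hc : pvAdj a i j = true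
  · rw [if_pos hc]
    have hil : i < G.length := by omega
    have hbij : (G.getD i 0).testBit j = false := by
      rw [Bool.eq_false_iff]
      intro hcon
      rw [hch i hi j] at hcon
      rcases hcon with h1 | ⟨h1, h2⟩ <;> omega
    have hG1 : ∀ p, (G.set i (G.getD i 0 + 2^j)).getD p 0 =
        if p = i then G.getD i 0 + 2^j else G.getD p 0 := fun p => pv_getD_set G i _ 0 hil p
    have hjl : j < (G.set i (G.getD i 0 + 2^j)).length := by
      rw [List.length_set]; omega
    have hbji : ((G.set i (G.getD i 0 + 2^j)).getD j 0).testBit i = false := by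
      rw [hG1 j, if_neg (by omega), Bool.eq_false_iff]
      intro hcon
      rw [hch j (by omega) i] at hcon
      rcases hcon with h1 | ⟨h1, h2⟩ <;> omega
    refine ⟨by rw [List.length_set, List.length_set]; exact hlen, fun p hp b => ?_⟩
    rw [pv_getD_set _ j _ 0 hjl p]
    by_cases hpj : p = j
    · subst hpj
      rw [if_pos rfl, pv_testBit_add_two_pow _ i b hbji, hG1 p, if_neg (by omega)]
      rw [Bool.or_eq_true, decide_eq_true_eq, hch p hp b]
      constructor
      · rintro ((h1 | ⟨h1, h2⟩) | h1)
        · exact Or.inl h1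
        · exact Or.inr ⟨by omega, h2⟩
        · subst h1
          exact Or.inr ⟨by omega, hc⟩
      · rintro (h1 | ⟨h1, h2⟩)
        · exact Or.inl (Or.inl h1)
        · by_cases hbi : b = i
          · exact Or.inr hbi
          · exact Or.inl (Or.inr ⟨by omega, h2⟩)
    · rw [if_neg hpj, hG1 p]
      by_cases hpi : p = i
      · subst hpi
        rw [if_pos rfl, pv_testBit_add_two_pow _ j b hbij]
        rw [Bool.or_eq_true, decide_eq_true_eq, hch p hp b]
        constructor
        · rintro ((h1 | ⟨h1, h2⟩) | h1)
          · exact Or.inl h1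
          · exact Or.inr ⟨by omega, h2⟩
          · subst h1
            exact Or.inr ⟨by omega, by rw [pvAdj_comm]; exact hc⟩
        · rintro (h1 | ⟨h1, h2⟩)
          · exact Or.inl (Or.inl h1)
          · by_cases hbj : b = j
            · exact Or.inr hbj
            · exact Or.inl (Or.inr ⟨by omega, h2⟩)
      · rw [if_neg hpi, hch p hp b]
        constructor
        · rintro (h1 | ⟨h1, h2⟩)
          · exact Or.inl h1
          · exact Or.inr ⟨by omega, h2⟩
        · rintro (h1 | ⟨h1, h2⟩)
          · exact Or.inl h1
          · exact Or.inr ⟨by omega, h2⟩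
  · rw [if_neg hc]
    refine ⟨hlen, fun p hp b => ?_⟩
    rw [hch p hp b]
    constructor
    · rintro (h1 | ⟨h1, h2⟩)
      · exact Or.inl h1
      · exact Or.inr ⟨by omega, h2⟩
    · rintro (h1 | ⟨h1, h2⟩)
      · exact Or.inl h1
      · -- if the new pair (j, i) were the reason, pvAdj would have to hold
        by_cases hnew : (b = j ∧ p = i) ∨ (b = i ∧ p = j)
        · exfalso
          rcases hnew with ⟨hb, hp'⟩ | ⟨hb, hp'⟩
          · subst hb; subst hp'
            exact hc (by rw [← pvAdj_comm]; exact h2)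
          · subst hb; subst hp'
            exact hc h2
        · exact Or.inr ⟨by omega, h2⟩

lemma pvG_init (nt : Nat) (a : List Int) :
    pvGInv nt a 0 0 ((List.range (nt+1)).map (fun i => 2^i)) := by
  refine ⟨by simp, fun p hp b => ?_⟩
  rw [pv_getD_pow_init nt p hp]
  constructor
  · intro h
    by_cases hb : b = p
    · exact Or.inl hb
    · rw [Nat.testBit_two_pow_of_ne (fun h' => hb h'.symm)] at h
      exact absurd h (by simp)
  · rintro (h | ⟨h1, h2⟩)
    · subst h
      exact Nat.testBit_two_pow_self
    · omega

lemma pv_gcdTab_inv (nt : Nat) (a : List Int) : pvGInv nt a nt 0 (pvA_gcdTab nt a) := by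
  unfold pvA_gcdTab
  apply pv_foldl_range_inv _ (fun i G => pvGInv nt a i 0 G) nt _ (pvG_init nt a)
  intro i G hi hG
  have hstep : pvGInv nt a i i ((List.range i).foldl (fun G j =>
      if pvAdj a i j then
        let G1 := G.set i (G.getD i 0 + 2^j)
        G1.set j (G1.getD j 0 + 2^i)
      else G) G) := by
    apply pv_foldl_range_inv _ (fun j G => pvGInv nt a i j G) i _ hG
    intro j G' hj hG'
    exact pvG_inner_step nt a i j G' (by omega) hj hG'
  obtain ⟨hlen, hch⟩ := hstep
  refine ⟨hlen, fun p hp b => ?_⟩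
  rw [hch p hp b]
  constructor
  · rintro (h1 | ⟨h1, h2⟩)
    · exact Or.inl h1
    · exact Or.inr ⟨by omega, h2⟩
  · rintro (h1 | ⟨h1, h2⟩)
    · exact Or.inl h1
    · exact Or.inr ⟨by omega, h2⟩

lemma pv_gcdTab_char (nt : Nat) (a : List Int) (p : Nat) (hp : p ≤ nt) (b : Nat) :
    ((pvA_gcdTab nt a).getD p 0).testBit b = true ↔
      (b = p ∨ (b < nt ∧ p < nt ∧ b ≠ p ∧ pvAdj a b p = true)) := by
  rw [(pv_gcdTab_inv nt a).2 p hp b]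
  constructor
  · rintro (h1 | ⟨h1, h2⟩)
    · exact Or.inl h1
    · exact Or.inr ⟨by omega, by omega, by omega, h2⟩
  · rintro (h1 | ⟨h1, h2, h3, h4⟩)
    · exact Or.inl h1
    · exact Or.inr ⟨by omega, h4⟩

-- main-loop invariant for A
def pvE1 (nt : Nat) (a : List Int) (t j b : Nat) : Prop :=
  b = j ∨ (j < b ∧ b ≤ j + t ∧ b ≤ nt ∧ pvL nt a j (b-1) = true)
def pvE2 (nt : Nat) (a : List Int) (t r b : Nat) : Prop :=
  b = r ∨ (b < r ∧ r ≤ b + t ∧ r < nt ∧ pvR nt a (b+1) r = true)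

def pvInv (nt : Nat) (a : List Int) (t : Nat) (st : List Nat × List Nat) : Prop :=
  st.1.length = nt+1 ∧ st.2.length = nt+1 ∧
  (∀ j ≤ nt, ∀ b, ((st.1.getD j 0).testBit b = true ↔ pvE1 nt a t j b)) ∧
  (∀ r ≤ nt, ∀ b, ((st.2.getD r 0).testBit b = true ↔ pvE2 nt a t r b))

def pvInvIn (nt : Nat) (a : List Int) (i J : Nat) (st : List Nat × List Nat) : Prop :=
  st.1.length = nt+1 ∧ st.2.length = nt+1 ∧
  (∀ j ≤ nt, ∀ b, ((st.1.getD j 0).testBit b = true ↔ pvE1 nt a (if j < J then i+1 else i) j b)) ∧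
  (∀ r ≤ nt, ∀ b, ((st.2.getD r 0).testBit b = true ↔ pvE2 nt a (if r < J + i then i+1 else i) r b))

lemma pvE1_coinc (nt : Nat) (a : List Int) (t j b : Nat) (h : nt < j + t + 1) :
    (pvE1 nt a t j b ↔ pvE1 nt a (t+1) j b) := by
  unfold pvE1
  constructor
  · rintro (h1 | ⟨h1, h2, h3, h4⟩)
    · exact Or.inl h1
    · exact Or.inr ⟨h1, by omega, h3, h4⟩
  · rintro (h1 | ⟨h1, h2, h3, h4⟩)
    · exact Or.inl h1
    · exact Or.inr ⟨h1, by omega, h3, h4⟩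

lemma pvE2_coinc (nt : Nat) (a : List Int) (t r b : Nat) (h : r ≤ t ∨ nt ≤ r) :
    (pvE2 nt a t r b ↔ pvE2 nt a (t+1) r b) := by
  unfold pvE2
  constructor
  · rintro (h1 | ⟨h1, h2, h3, h4⟩)
    · exact Or.inl h1
    · exact Or.inr ⟨h1, by omega, h3, h4⟩
  · rintro (h1 | ⟨h1, h2, h3, h4⟩)
    · exact Or.inl h1
    · exact Or.inr ⟨h1, by omega, h3, h4⟩

lemma pv_merge1 (nt : Nat) (a : List Int) (i j b : Nat) (h : j + i + 1 ≤ nt) :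
    ((pvE1 nt a i j b ∨ (pvL nt a j (j+i) = true ∧ b = j+i+1)) ↔ pvE1 nt a (i+1) j b) := by
  unfold pvE1
  constructor
  · rintro ((h1 | ⟨h1, h2, h3, h4⟩) | ⟨h1, h2⟩)
    · exact Or.inl h1
    · exact Or.inr ⟨h1, by omega, h3, h4⟩
    · subst h2
      refine Or.inr ⟨by omega, by omega, by omega, ?_⟩
      have e : j + i + 1 - 1 = j + i := by omega
      rw [e]
      exact h1
  · rintro (h1 | ⟨h1, h2, h3, h4⟩)
    · exact Or.inl (Or.inl h1)
    · by_cases hb : b = j + i + 1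
      · subst hb
        right
        refine ⟨?_, rfl⟩
        have e : j + i + 1 - 1 = j + i := by omega
        rw [e] at h4
        exact h4
      · exact Or.inl (Or.inr ⟨h1, by omega, h3, h4⟩)

lemma pv_merge2 (nt : Nat) (a : List Int) (i j b : Nat) (hj : 1 ≤ j) (h : i + j < nt) :
    ((pvE2 nt a i (i+j) b ∨ (pvR nt a j (i+j) = true ∧ b = j-1)) ↔ pvE2 nt a (i+1) (i+j) b) := by
  unfold pvE2
  constructor
  · rintro ((h1 | ⟨h1, h2, h3, h4⟩) | ⟨h1, h2⟩)
    · exact Or.inl h1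
    · exact Or.inr ⟨h1, by omega, h3, h4⟩
    · subst h2
      refine Or.inr ⟨by omega, by omega, by omega, ?_⟩
      have e : j - 1 + 1 = j := by omega
      rw [e]
      exact h1
  · rintro (h1 | ⟨h1, h2, h3, h4⟩)
    · exact Or.inl (Or.inl h1)
    · by_cases hb : b = j - 1
      · subst hb
        right
        refine ⟨?_, rfl⟩
        have e : j - 1 + 1 = j := by omega
        rw [e] at h4
        exact h4
      · exact Or.inl (Or.inr ⟨h1, by omega, h3, h4⟩)

lemma pv_condL (nt : Nat) (a : List Int) (i j : Nat) (c1 c2 : Nat) (hij : i + j + 1 ≤ nt)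
    (h1 : ∀ b, (c1.testBit b = true ↔ pvE1 nt a i j b))
    (h2 : ∀ b, (c2.testBit b = true ↔ pvE2 nt a i (i+j) b)) :
    (c1 &&& c2 &&& (pvA_gcdTab nt a).getD (j+i+1) 0 ≠ 0) ↔ pvL nt a j (i+j) = true := by
  rw [pv_land3_ne_zero, pvL_iff]
  constructor
  · rintro ⟨b, hb1, hb2, hb3⟩
    rw [h1 b] at hb1
    rw [h2 b] at hb2
    rw [pv_gcdTab_char nt a (j+i+1) (by omega) b] at hb3
    have hble : b ≤ i + j := by
      rcases hb2 with h | ⟨h, _⟩ <;> omega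
    rcases hb3 with h | ⟨hb3a, hb3b, hb3c, hb3d⟩
    · omega
    refine ⟨b, ?_, hble, ?_, ?_, by omega, ?_⟩
    · rcases hb1 with h | ⟨h, _⟩ <;> omega
    · rcases hb1 with h | ⟨_, _, _, h⟩
      · exact Or.inl h
      · exact Or.inr h
    · rcases hb2 with h | ⟨_, _, _, h⟩
      · exact Or.inl h
      · exact Or.inr h
    · have e : i + j + 1 = j + i + 1 := by omega
      rw [e]
      exact hb3d
  · rintro ⟨k, hk1, hk2, hk3, hk4, hk5, hk6⟩
    refine ⟨k, ?_, ?_, ?_⟩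
    · rw [h1 k]
      by_cases hkl : k = j
      · exact Or.inl hkl
      · rcases hk3 with h | h
        · exact Or.inl h
        · exact Or.inr ⟨by omega, by omega, by omega, h⟩
    · rw [h2 k]
      by_cases hkr : k = i + j
      · exact Or.inl hkr
      · rcases hk4 with h | h
        · exact Or.inl h
        · exact Or.inr ⟨by omega, by omega, by omega, h⟩
    · rw [pv_gcdTab_char nt a (j+i+1) (by omega) k]
      refine Or.inr ⟨by omega, by omega, by omega, ?_⟩
      have e : j + i + 1 = i + j + 1 := by omega
      rw [e]
      exact hk6

lemma pv_condR (nt : Nat) (a : List Int) (i j : Nat) (c1 c2 : Nat) (hj : 1 ≤ j) (hij : i + j + 1 ≤ nt)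
    (h1 : ∀ b, (c1.testBit b = true ↔ pvE1 nt a (i+1) j b))
    (h2 : ∀ b, (c2.testBit b = true ↔ pvE2 nt a i (i+j) b)) :
    (c1 &&& c2 &&& (pvA_gcdTab nt a).getD (j-1) 0 ≠ 0) ↔ pvR nt a j (i+j) = true := by
  rw [pv_land3_ne_zero, pvR_iff]
  constructor
  · rintro ⟨b, hb1, hb2, hb3⟩
    rw [h1 b] at hb1
    rw [h2 b] at hb2
    rw [pv_gcdTab_char nt a (j-1) (by omega) b] at hb3
    have hbge : j ≤ b := by
      rcases hb1 with h | ⟨h, _⟩ <;> omega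
    have hble : b ≤ i + j := by
      rcases hb2 with h | ⟨h, _⟩ <;> omega
    rcases hb3 with h | ⟨hb3a, hb3b, hb3c, hb3d⟩
    · omega
    refine ⟨b, hbge, hble, ?_, ?_, hj, hb3d⟩
    · rcases hb1 with h | ⟨_, _, _, h⟩
      · exact Or.inl h
      · exact Or.inr h
    · rcases hb2 with h | ⟨_, _, _, h⟩
      · exact Or.inl h
      · exact Or.inr h
  · rintro ⟨k, hk1, hk2, hk3, hk4, hk5, hk6⟩
    refine ⟨k, ?_, ?_, ?_⟩
    · rw [h1 k]
      by_cases hkl : k = j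
      · exact Or.inl hkl
      · rcases hk3 with h | h
        · exact Or.inl h
        · exact Or.inr ⟨by omega, by omega, by omega, h⟩
    · rw [h2 k]
      by_cases hkr : k = i + j
      · exact Or.inl hkr
      · rcases hk4 with h | h
        · exact Or.inl h
        · exact Or.inr ⟨by omega, by omega, by omega, h⟩
    · rw [pv_gcdTab_char nt a (j-1) (by omega) k]
      exact Or.inr ⟨by omega, by omega, by omega, hk6⟩

lemma pvA_inner_step (nt : Nat) (a : List Int) (i j : Nat) (st : List Nat × List Nat)
    (hi : i < nt) (hj : 1 ≤ j) (hjn : j < nt - i) (h : pvInvIn nt a i j st) :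
    pvInvIn nt a i (j+1) (pvA_innerBody (pvA_gcdTab nt a) i st j) := by
  obtain ⟨hl1, hl2, hc1, hc2⟩ := h
  have hjle : j ≤ nt := by omega
  have hijlt : i + j < nt := by omega
  have H1 : ∀ b, ((st.1.getD j 0).testBit b = true ↔ pvE1 nt a i j b) := by
    intro b
    have hx := hc1 j hjle b
    rwa [if_neg (by omega)] at hx
  have H2 : ∀ b, ((st.2.getD (i+j) 0).testBit b = true ↔ pvE2 nt a i (i+j) b) := by
    intro b
    have hx := hc2 (i+j) (by omega) b
    rwa [if_neg (by omega)] at hx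
  have hcondL := pv_condL nt a i j (st.1.getD j 0) (st.2.getD (i+j) 0) (by omega) H1 H2
  simp only [pvA_innerBody]
  set x1 := st.1.getD j 0 |||
    (if st.1.getD j 0 &&& st.2.getD (i+j) 0 &&& (pvA_gcdTab nt a).getD (j+i+1) 0 ≠ 0
     then 2^(i+j+1) else 0) with hx1
  set c1 := st.1.set j x1 with hc1def
  -- characterisation of the updated check1
  have HC1 : ∀ p, p ≤ nt → ∀ b,
      ((c1.getD p 0).testBit b = true ↔ pvE1 nt a (if p < j+1 then i+1 else i) p b) := by
    intro p hp b
    rw [hc1def, pv_getD_set st.1 j x1 0 (by omega) p]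
    by_cases hpj : p = j
    · subst hpj
      rw [if_pos rfl, if_pos (by omega), hx1, pv_lor_ite_testBit]
      rw [hcondL]
      have e : p + i = i + p := by omega
      have e2 : i + p + 1 = p + i + 1 := by omega
      constructor
      · intro hx
        rcases hx with hx | ⟨hx, hb⟩
        · rw [H1 b] at hx
          rw [← pv_merge1 nt a i p b (by omega)]
          exact Or.inl hx
        · rw [← pv_merge1 nt a i p b (by omega)]
          refine Or.inr ⟨by rw [e]; exact hx, by omega⟩
      · intro hx
        rw [← pv_merge1 nt a i p b (by omega)] at hx
        rcases hx with hx | ⟨hx, hb⟩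
        · exact Or.inl ((H1 b).mpr hx)
        · exact Or.inr ⟨by rw [← e]; exact hx, by omega⟩
    · rw [if_neg hpj]
      have hx := hc1 p hp b
      by_cases hplt : p < j
      · rw [if_pos hplt] at hx
        rw [if_pos (by omega)]
        exact hx
      · rw [if_neg hplt] at hx
        rw [if_neg (by omega)]
        exact hx
  have HR : ∀ b, ((c1.getD j 0).testBit b = true ↔ pvE1 nt a (i+1) j b) := by
    intro b
    have hx := HC1 j hjle b
    rwa [if_pos (by omega)] at hx
  have hcondR := pv_condR nt a i j (c1.getD j 0) (st.2.getD (i+j) 0) hj (by omega) HR H2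
  refine ⟨by rw [hc1def, List.length_set]; exact hl1, by rw [List.length_set]; exact hl2, HC1, ?_⟩
  intro r hr b
  rw [pv_getD_set st.2 (j+i) _ 0 (by omega) r]
  by_cases hrji : r = j + i
  · subst hrji
    rw [if_pos rfl, pv_lor_ite_testBit, if_pos (by omega)]
    have e : j + i = i + j := by omega
    rw [e, hcondR, ← pv_merge2 nt a i j b hj (by omega)]
    constructor
    · rintro (hx | ⟨hx, hb⟩)
      · exact Or.inl ((H2 b).mp hx)
      · exact Or.inr ⟨hx, by omega⟩
    · rintro (hx | ⟨hx, hb⟩)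
      · exact Or.inl ((H2 b).mpr hx)
      · exact Or.inr ⟨hx, by omega⟩
  · rw [if_neg hrji]
    have hx := hc2 r hr b
    by_cases hrlt : r < j + i
    · rw [if_pos hrlt] at hx
      rw [if_pos (by omega)]
      exact hx
    · rw [if_neg hrlt] at hx
      rw [if_neg (by omega)]
      exact hx

lemma pvA_outer_step (nt : Nat) (a : List Int) (i : Nat) (st : List Nat × List Nat)
    (hi : i < nt) (h : pvInv nt a i st) :
    pvInv nt a (i+1) (pvA_outerBody nt (pvA_gcdTab nt a) st i) := by
  obtain ⟨hl1, hl2, hc1, hc2⟩ := h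
  have H1 : ∀ b, ((st.1.getD 0 0).testBit b = true ↔ pvE1 nt a i 0 b) := fun b => hc1 0 (by omega) b
  have H2 : ∀ b, ((st.2.getD i 0).testBit b = true ↔ pvE2 nt a i (i+0) b) := by
    intro b
    have hx := hc2 i (by omega) b
    rw [show i + 0 = i from rfl]
    exact hx
  have hcondL := pv_condL nt a i 0 (st.1.getD 0 0) (st.2.getD i 0) (by omega) H1 H2
  rw [show (0:Nat) + i + 1 = i + 1 from by omega, show i + 0 = 0 + i from by omega] at hcondL
  simp only [pvA_outerBody]
  set x1 := st.1.getD 0 0 |||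
    (if st.1.getD 0 0 &&& st.2.getD i 0 &&& (pvA_gcdTab nt a).getD (i+1) 0 ≠ 0
     then 2^(i+1) else 0) with hx1
  set c1 := st.1.set 0 x1 with hc1def
  -- state after the j = 0 assignment satisfies the inner invariant at J = 1
  have hbase : pvInvIn nt a i 1 (c1, st.2) := by
    refine ⟨by rw [hc1def, List.length_set]; exact hl1, hl2, ?_, ?_⟩
    · intro p hp b
      rw [hc1def, pv_getD_set st.1 0 x1 0 (by omega) p]
      by_cases hp0 : p = 0
      · subst hp0
        rw [if_pos rfl, if_pos (by omega), hx1, pv_lor_ite_testBit, hcondL]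
        constructor
        · intro hx
          rcases hx with hx | ⟨hx, hb⟩
          · rw [H1 b] at hx
            rw [← pv_merge1 nt a i 0 b (by omega)]
            exact Or.inl hx
          · rw [← pv_merge1 nt a i 0 b (by omega)]
            exact Or.inr ⟨hx, by omega⟩
        · intro hx
          rw [← pv_merge1 nt a i 0 b (by omega)] at hx
          rcases hx with hx | ⟨hx, hb⟩
          · exact Or.inl ((H1 b).mpr hx)
          · exact Or.inr ⟨hx, by omega⟩
      · rw [if_neg hp0, if_neg (by omega)]
        exact hc1 p hp b
    · intro r hr b
      by_cases hri : r < 1 + i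
      · rw [if_pos (by omega)]
        have hx := hc2 r hr b
        rwa [← pvE2_coinc nt a i r b (by omega)]
      · rw [if_neg (by omega)]
        exact hc2 r hr b
  have hfold : pvInvIn nt a i (1 + (nt - i - 1))
      ((List.range' 1 (nt - i - 1)).foldl (pvA_innerBody (pvA_gcdTab nt a) i) (c1, st.2)) := by
    apply pv_foldl_range'_inv _ (fun J st => pvInvIn nt a i J st) 1 (nt - i - 1) _ hbase
    intro j stj hj1 hj2 hstj
    exact pvA_inner_step nt a i j stj hi (by omega) (by omega) hstj
  have e : 1 + (nt - i - 1) = nt - i := by omega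
  rw [e] at hfold
  obtain ⟨hl1', hl2', hc1', hc2'⟩ := hfold
  refine ⟨hl1', hl2', ?_, ?_⟩
  · intro p hp b
    have hx := hc1' p hp b
    by_cases hplt : p < nt - i
    · rwa [if_pos hplt] at hx
    · rw [if_neg hplt] at hx
      rw [hx]
      exact pvE1_coinc nt a i p b (by omega)
  · intro r hr b
    have hx := hc2' r hr b
    by_cases hrlt : r < nt - i + i
    · rwa [if_pos hrlt] at hx
    · rw [if_neg hrlt] at hx
      rw [hx]
      exact pvE2_coinc nt a i r b (by omega)

lemma pvInv_init (nt : Nat) (a : List Int) :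
    pvInv nt a 0 ((List.range (nt+1)).map (fun j => 2^j), (List.range (nt+1)).map (fun j => 2^j)) := by
  refine ⟨by simp, by simp, ?_, ?_⟩
  · intro j hj b
    rw [pv_getD_pow_init nt j hj]
    unfold pvE1
    constructor
    · intro h
      by_cases hb : b = j
      · exact Or.inl hb
      · rw [Nat.testBit_two_pow_of_ne (fun h' => hb h'.symm)] at h
        exact absurd h (by simp)
    · rintro (h | ⟨h1, h2, h3, h4⟩)
      · subst h
        exact Nat.testBit_two_pow_self
      · omega
  · intro r hr b
    rw [pv_getD_pow_init nt r hr]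
    unfold pvE2
    constructor
    · intro h
      by_cases hb : b = r
      · exact Or.inl hb
      · rw [Nat.testBit_two_pow_of_ne (fun h' => hb h'.symm)] at h
        exact absurd h (by simp)
    · rintro (h | ⟨h1, h2, h3, h4⟩)
      · subst h
        exact Nat.testBit_two_pow_self
      · omega

lemma pvA_eq_answer (n : Int) (a : List Int) (hn : 0 ≤ n) :
    can_construct_bst n a = pvAnswer n.toNat a := by
  by_cases hn0 : n = 0
  · subst hn0
    with_unfolding_all rfl
  · have hnt1 : 1 ≤ n.toNat := by omega
    set nt := n.toNat with hntdef
    set st := (List.range nt).foldl (pvA_outerBody nt (pvA_gcdTab nt a))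
      ((List.range (nt+1)).map (fun j => 2^j), (List.range (nt+1)).map (fun j => 2^j)) with hstdef
    have hInv : pvInv nt a nt st := by
      rw [hstdef]
      apply pv_foldl_range_inv _ (fun t st => pvInv nt a t st) nt _ (pvInv_init nt a)
      intro i st hi hst
      exact pvA_outer_step nt a i st hi hst
    obtain ⟨hl1, hl2, hc1, hc2⟩ := hInv
    have hA : can_construct_bst n a =
        decide (st.1.getD 0 0 &&& (PySem.List.pyGet? st.2 (n-1)).getD 0 ≠ 0) := rfl
    -- the possibly-negative Python index n-1 is just nt-1 here
    have hcast : n - 1 = ((nt - 1 : Nat) : Int) := by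
      have : (nt : Int) = n := by rw [hntdef]; omega
      omega
    rw [hA, hcast, PySem.List.pyGet?_natCast]
    have hgd : st.2.getD (nt-1) 0 = (st.2[(nt - 1 : Nat)]?).getD 0 := List.getD_eq_getElem?_getD
    rw [← hgd]
    unfold pvAnswer
    rw [if_neg (by omega)]
    rw [Bool.eq_iff_iff, decide_eq_true_eq, pv_land2_ne_zero, List.any_eq_true]
    constructor
    · rintro ⟨b, hb1, hb2⟩
      rw [hc1 0 (by omega) b] at hb1
      rw [hc2 (nt-1) (by omega) b] at hb2
      have hble : b ≤ nt - 1 := by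
        rcases hb2 with h' | ⟨h', _⟩ <;> omega
      refine ⟨b, List.mem_range.mpr (by omega), ?_⟩
      simp only [Bool.and_eq_true, Bool.or_eq_true, beq_iff_eq]
      constructor
      · rcases hb1 with h' | ⟨_, _, _, h'⟩
        · exact Or.inl h'
        · exact Or.inr h'
      · rcases hb2 with h' | ⟨_, _, _, h'⟩
        · exact Or.inl h'
        · exact Or.inr h'
    · rintro ⟨k, hkmem, hk⟩
      have hklt := List.mem_range.mp hkmem
      simp only [Bool.and_eq_true, Bool.or_eq_true, beq_iff_eq] at hk
      obtain ⟨h1, h2⟩ := hk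
      refine ⟨k, ?_, ?_⟩
      · rw [hc1 0 (by omega) k]
        by_cases hk0 : k = 0
        · exact Or.inl hk0
        · rcases h1 with h' | h'
          · exact Or.inl h'
          · exact Or.inr ⟨by omega, by omega, by omega, h'⟩
      · rw [hc2 (nt-1) (by omega) k]
        by_cases hkn : k = nt - 1
        · exact Or.inl hkn
        · rcases h2 with h' | h'
          · exact Or.inl h'
          · exact Or.inr ⟨by omega, by omega, by omega, h'⟩

-- B-side invariants
def pvBInv (nt : Nat) (a : List Int) (R : Nat)
    (tb : PySem.Dict (Int × Int) Bool × PySem.Dict (Int × Int) Bool) : Prop :=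
  ∀ l r : Nat, l ≤ r → r < R →
    tb.1.getD ((l:Int), (r:Int)) false = pvL nt a l r ∧
    tb.2.getD ((l:Int), (r:Int)) false = pvR nt a l r

def pvBInvIn (nt : Nat) (a : List Int) (R L : Nat)
    (tb : PySem.Dict (Int × Int) Bool × PySem.Dict (Int × Int) Bool) : Prop :=
  pvBInv nt a R tb ∧
  ∀ l : Nat, L ≤ l → l ≤ R →
    tb.1.getD ((l:Int), (R:Int)) false = pvL nt a l R ∧
    tb.2.getD ((l:Int), (R:Int)) false = pvR nt a l R

lemma pv_foldl_or_pair {α : Type} (xs : List α) (h : α → Bool) (u v : α → Bool) (x y : Bool) :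
    xs.foldl (fun (ok : Bool × Bool) k => if h k then (ok.1 || u k, ok.2 || v k) else ok) (x, y)
      = (x || xs.any (fun k => h k && u k), y || xs.any (fun k => h k && v k)) := by
  induction xs generalizing x y with
  | nil => simp
  | cons hd tl ih =>
    simp only [List.foldl_cons, List.any_cons]
    by_cases hh : h hd = true
    · rw [if_pos hh, ih, hh]
      simp [Bool.or_assoc]
    · have hf : h hd = false := Bool.eq_false_iff.mpr hh
      rw [if_neg hh, ih, hf]
      simp

lemma pvB_inner_step (nt : Nat) (a : List Int) (r l : Nat)
    (tb : PySem.Dict (Int × Int) Bool × PySem.Dict (Int × Int) Bool)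
    (hl : l < r + 1) (h : pvBInvIn nt a r (l+1) tb) :
    pvBInvIn nt a r l (pvB_innerBody nt a r tb l) := by
  obtain ⟨hPrev, hRow⟩ := h
  unfold pvB_innerBody
  rw [pv_foldl_or_pair]
  simp only [Bool.false_or]
  -- the two accumulated any-scans compute pvL and pvR of the current interval
  have hL : ((List.range' l (r + 1 - l)).any (fun k =>
      (((k == l) || tb.1.getD ((l : Int), (k : Int) - 1) false) &&
       ((k == r) || tb.2.getD ((k : Int) + 1, (r : Int)) false)) &&
      (decide (r + 1 < nt) && pvAdj a k (r+1)))) = pvL nt a l r := by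
    rw [Bool.eq_iff_iff, List.any_eq_true, pvL_iff]
    constructor
    · rintro ⟨k, hkmem, hk⟩
      have hkb := List.mem_range'_1.mp hkmem
      simp only [Bool.and_eq_true, Bool.or_eq_true, beq_iff_eq, decide_eq_true_eq] at hk
      obtain ⟨⟨hleft, hright⟩, hnt, hadj⟩ := hk
      refine ⟨k, by omega, by omega, ?_, ?_, hnt, by simpa using hadj⟩
      · by_cases hkl : k = l
        · exact Or.inl hkl
        · rcases hleft with h' | h'
          · exact Or.inl h'
          · right
            have hc : ((k : Int) - 1) = ((k - 1 : Nat) : Int) := by omega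
            rw [hc] at h'
            rw [← (hPrev l (k-1) (by omega) (by omega)).1]
            exact h'
      · by_cases hkr : k = r
        · exact Or.inl hkr
        · rcases hright with h' | h'
          · exact Or.inl h'
          · right
            have hc : ((k : Int) + 1) = ((k + 1 : Nat) : Int) := by omega
            rw [hc] at h'
            rw [← (hRow (k+1) (by omega) (by omega)).2]
            exact h'
    · rintro ⟨k, hk1, hk2, hk3, hk4, hk5, hk6⟩
      refine ⟨k, List.mem_range'_1.mpr ⟨hk1, by omega⟩, ?_⟩
      simp only [Bool.and_eq_true, Bool.or_eq_true, beq_iff_eq, decide_eq_true_eq]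
      refine ⟨⟨?_, ?_⟩, hk5, by simpa using hk6⟩
      · rcases hk3 with h' | h'
        · exact Or.inl h'
        · by_cases hkl : k = l
          · exact Or.inl hkl
          · right
            have hc : ((k : Int) - 1) = ((k - 1 : Nat) : Int) := by omega
            rw [hc, (hPrev l (k-1) (by omega) (by omega)).1]
            exact h'
      · rcases hk4 with h' | h'
        · exact Or.inl h'
        · by_cases hkr : k = r
          · exact Or.inl hkr
          · right
            have hc : ((k : Int) + 1) = ((k + 1 : Nat) : Int) := by omega
            rw [hc, (hRow (k+1) (by omega) (by omega)).2]
            exact h'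
  have hR : ((List.range' l (r + 1 - l)).any (fun k =>
      (((k == l) || tb.1.getD ((l : Int), (k : Int) - 1) false) &&
       ((k == r) || tb.2.getD ((k : Int) + 1, (r : Int)) false)) &&
      (decide (0 < l) && pvAdj a k (l-1)))) = pvR nt a l r := by
    rw [Bool.eq_iff_iff, List.any_eq_true, pvR_iff]
    constructor
    · rintro ⟨k, hkmem, hk⟩
      have hkb := List.mem_range'_1.mp hkmem
      simp only [Bool.and_eq_true, Bool.or_eq_true, beq_iff_eq, decide_eq_true_eq] at hk
      obtain ⟨⟨hleft, hright⟩, hlp, hadj⟩ := hk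
      refine ⟨k, by omega, by omega, ?_, ?_, by omega, by simpa using hadj⟩
      · by_cases hkl : k = l
        · exact Or.inl hkl
        · rcases hleft with h' | h'
          · exact Or.inl h'
          · right
            have hc : ((k : Int) - 1) = ((k - 1 : Nat) : Int) := by omega
            rw [hc] at h'
            rw [← (hPrev l (k-1) (by omega) (by omega)).1]
            exact h'
      · by_cases hkr : k = r
        · exact Or.inl hkr
        · rcases hright with h' | h'
          · exact Or.inl h'
          · right
            have hc : ((k : Int) + 1) = ((k + 1 : Nat) : Int) := by omega
            rw [hc] at h'
            rw [← (hRow (k+1) (by omega) (by omega)).2]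
            exact h'
    · rintro ⟨k, hk1, hk2, hk3, hk4, hk5, hk6⟩
      refine ⟨k, List.mem_range'_1.mpr ⟨hk1, by omega⟩, ?_⟩
      simp only [Bool.and_eq_true, Bool.or_eq_true, beq_iff_eq, decide_eq_true_eq]
      refine ⟨⟨?_, ?_⟩, by omega, by simpa using hk6⟩
      · rcases hk3 with h' | h'
        · exact Or.inl h'
        · by_cases hkl : k = l
          · exact Or.inl hkl
          · right
            have hc : ((k : Int) - 1) = ((k - 1 : Nat) : Int) := by omega
            rw [hc, (hPrev l (k-1) (by omega) (by omega)).1]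
            exact h'
      · rcases hk4 with h' | h'
        · exact Or.inl h'
        · by_cases hkr : k = r
          · exact Or.inl hkr
          · right
            have hc : ((k : Int) + 1) = ((k + 1 : Nat) : Int) := by omega
            rw [hc, (hRow (k+1) (by omega) (by omega)).2]
            exact h'
  rw [hL, hR]
  constructor
  · intro l' r' hlr' hr'
    have hne : ((l' : Int), (r' : Int)) ≠ ((l : Int), (r : Int)) := by
      intro hcon
      have h2 := congrArg Prod.snd hcon
      simp only at h2
      omega
    rw [PySem.Dict.getD_insert, if_neg hne, PySem.Dict.getD_insert, if_neg hne]
    exact hPrev l' r' hlr' hr'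
  · intro l' hl1 hl2
    by_cases hll : l' = l
    · subst hll
      rw [PySem.Dict.getD_insert, if_pos rfl, PySem.Dict.getD_insert, if_pos rfl]
      exact ⟨rfl, rfl⟩
    · have hne : ((l' : Int), (r : Int)) ≠ ((l : Int), (r : Int)) := by
        intro hcon
        have h2 := congrArg Prod.fst hcon
        simp only at h2
        omega
      rw [PySem.Dict.getD_insert, if_neg hne, PySem.Dict.getD_insert, if_neg hne]
      exact hRow l' (by omega) hl2

lemma pvB_outer_step (nt : Nat) (a : List Int) (r : Nat)
    (tb : PySem.Dict (Int × Int) Bool × PySem.Dict (Int × Int) Bool)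
    (h : pvBInv nt a r tb) :
    pvBInv nt a (r+1) (pvB_outerBody nt a tb r) := by
  unfold pvB_outerBody
  have h0 : pvBInvIn nt a r (r+1) tb := ⟨h, fun l hl1 hl2 => by omega⟩
  have hend := pv_foldl_revrange_inv (pvB_innerBody nt a r)
    (fun L tb' => pvBInvIn nt a r L tb') (r+1) tb h0
    (fun l st hl hp => pvB_inner_step nt a r l st hl hp)
  obtain ⟨hP, hRow⟩ := hend
  intro l' r' hlr' hr'
  by_cases hrr : r' < r
  · exact hP l' r' hlr' hrr
  · have : r' = r := by omega
    subst this
    exact hRow l' (by omega) hlr'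

lemma pvB_eq_answer (n : Int) (a : List Int) (hn : 0 ≤ n) :
    can_construct_bst_alt n a = pvAnswer n.toNat a := by
  by_cases hn0 : n = 0
  · subst hn0
    with_unfolding_all rfl
  · have hnt : n.toNat ≠ 0 := by omega
    unfold can_construct_bst_alt
    rw [if_neg (by simpa using hn0)]
    have hInv : pvBInv n.toNat a n.toNat ((List.range n.toNat).foldl (pvB_outerBody n.toNat a)
        ((PySem.Dict.empty : PySem.Dict (Int × Int) Bool),
         (PySem.Dict.empty : PySem.Dict (Int × Int) Bool))) := by
      apply pv_foldl_range_inv _ (fun R tb => pvBInv n.toNat a R tb) n.toNat _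
        (fun l r hlr hr => by omega)
      intro r tb hr htb
      exact pvB_outer_step n.toNat a r tb htb
    set nt := n.toNat with hntdef
    set tb := (List.range nt).foldl (pvB_outerBody nt a)
      ((PySem.Dict.empty : PySem.Dict (Int × Int) Bool),
       (PySem.Dict.empty : PySem.Dict (Int × Int) Bool)) with htbdef
    unfold pvAnswer
    rw [if_neg hnt]
    rw [Bool.eq_iff_iff, List.any_eq_true, List.any_eq_true]
    constructor
    · rintro ⟨k, hkmem, hk⟩
      have hklt := List.mem_range.mp hkmem
      refine ⟨k, hkmem, ?_⟩
      simp only [Bool.and_eq_true, Bool.or_eq_true, beq_iff_eq] at hk ⊢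
      obtain ⟨h1, h2⟩ := hk
      constructor
      · rcases h1 with h' | h'
        · exact Or.inl h'
        · by_cases hk0 : k = 0
          · exact Or.inl hk0
          · right
            have hc : ((0 : Int), (k : Int) - 1) = (((0:Nat) : Int), ((k - 1 : Nat) : Int)) := by
              have e2 : (k : Int) - 1 = ((k - 1 : Nat) : Int) := by omega
              rw [e2]
              norm_num
            rw [hc, (hInv 0 (k-1) (by omega) (by omega)).1] at h'
            exact h'
      · rcases h2 with h' | h'
        · exact Or.inl h'
        · by_cases hkn : k = nt - 1
          · exact Or.inl hkn
          · right
            have hc : ((k : Int) + 1, (nt : Int) - 1) = (((k+1 : Nat) : Int), ((nt - 1 : Nat) : Int)) := by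
              have e1 : (k : Int) + 1 = ((k + 1 : Nat) : Int) := by omega
              have e2 : (nt : Int) - 1 = ((nt - 1 : Nat) : Int) := by omega
              rw [e1, e2]
            rw [hc, (hInv (k+1) (nt-1) (by omega) (by omega)).2] at h'
            exact h'
    · rintro ⟨k, hkmem, hk⟩
      have hklt := List.mem_range.mp hkmem
      refine ⟨k, hkmem, ?_⟩
      simp only [Bool.and_eq_true, Bool.or_eq_true, beq_iff_eq] at hk ⊢
      obtain ⟨h1, h2⟩ := hk
      constructor
      · rcases h1 with h' | h'
        · exact Or.inl h'
        · by_cases hk0 : k = 0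
          · exact Or.inl hk0
          · right
            have hc : ((0 : Int), (k : Int) - 1) = (((0:Nat) : Int), ((k - 1 : Nat) : Int)) := by
              have e2 : (k : Int) - 1 = ((k - 1 : Nat) : Int) := by omega
              rw [e2]
              norm_num
            rw [hc, (hInv 0 (k-1) (by omega) (by omega)).1]
            exact h'
      · rcases h2 with h' | h'
        · exact Or.inl h'
        · by_cases hkn : k = nt - 1
          · exact Or.inl hkn
          · right
            have hc : ((k : Int) + 1, (nt : Int) - 1) = (((k+1 : Nat) : Int), ((nt - 1 : Nat) : Int)) := by
              have e1 : (k : Int) + 1 = ((k + 1 : Nat) : Int) := by omega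
              have e2 : (nt : Int) - 1 = ((nt - 1 : Nat) : Int) := by omega
              rw [e1, e2]
            rw [hc, (hInv (k+1) (nt-1) (by omega) (by omega)).2]
            exact h'

-- ===== VERDICT (by name: the statement is the Claim_ definition above) =====
theorem can_construct_bst_spec : Claim_equal_can_construct_bst := by
  intro n a _ hpre
  unfold Spec_can_construct_bst
  rw [pvA_eq_answer n a hpre.1, pvB_eq_answer n a hpre.1]
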